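-- pv_equiv track=rewrite | github.com/knthmn/advent-of-code-2022 | d23.py | step
-- ===== SOURCE A (Python) =====
-- from collections import Counter
--
-- directions = [(0, -1), (0, 1), (-1, 0), (1, 0)]
--
-- def step(elves, first_direction):
--     proposals = {}
--     for elf in elves:
--         x, y = elf
--         neighbors = ((x + dx, y + dy) for dx in range(-1, 2) for dy in range(-1, 2))
--         if all(neighbor not in elves or neighbor == elf for neighbor in neighbors):
--             proposals[elf] = elf
--             continue
--         for direction_shift in range(4):
--             dx, dy = directions[(first_direction + direction_shift) % 4]
--             check_locations = (
--                 ((x + cx, y + dy) for cx in range(-1, 2))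
--                 if dx == 0
--                 else ((x + dx, y + cy) for cy in range(-1, 2))
--             )
--             if all(check_location not in elves for check_location in check_locations):
--                 proposals[elf] = x + dx, y + dy
--                 break
--             else:
--                 proposals[elf] = elf
--     counter = Counter(proposals.values())
--     new_elves = set()
--     for elf in elves:
--         if counter[proposals[elf]] == 1:
--             new_elves.add(proposals[elf])
--         else:
--             new_elves.add(elf)
--     return new_elves
-- ===== SOURCE B (Python) =====
-- directions = [(0, -1), (0, 1), (-1, 0), (1, 0)]
--
-- def _choice_table():
--     # _CHOICE[fd][mask]: first unblocked direction in rotation order starting at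
--     # fd; None if mask == 0 (no neighbours: stay put) or all four are blocked
--     table = []
--     for fd in range(4):
--         row = [None]
--         for mask in range(1, 16):
--             pick = None
--             for s in range(4):
--                 d = (fd + s) % 4
--                 if not mask >> d & 1:
--                     pick = d
--                     break
--             row.append(pick)
--         table.append(row)
--     return table
--
-- _CHOICE = _choice_table()
--
-- def step(elves, first_direction):
--     # scatter pass: every elf stamps the cells whose moves it blocks,
--     # one set per direction (their union is "has a neighbour")
--     blocked = [set(), set(), set(), set()]
--     for x, y in set(elves):
--         for c in (-1, 0, 1):
--             blocked[0].add((x + c, y + 1))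
--             blocked[1].add((x + c, y - 1))
--             blocked[2].add((x + 1, y + c))
--             blocked[3].add((x - 1, y + c))
--     row = _CHOICE[first_direction % 4]
--     proposals = []
--     for elf in dict.fromkeys(elves):
--         mask = 0
--         for d in range(4):
--             if elf in blocked[d]:
--                 mask |= 1 << d
--         pick = row[mask]
--         if pick is None:
--             proposals.append((elf, elf))
--         else:
--             dx, dy = directions[pick]
--             proposals.append((elf, (elf[0] + dx, elf[1] + dy)))
--     tally = {}
--     for _, t in proposals:
--         tally[t] = tally.get(t, 0) + 1
--     return {e if tally[t] > 1 else t for e, t in proposals}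
-- ===== Notes on version B (the rewrite author's own statement) =====
-- stated objective: alternative
-- what changed: B inverts A's gather-style neighbourhood scans into a scatter pass (each elf stamps the cells whose moves it blocks into four per-direction sets), picks each elf's move by looking up a precomputed (first_direction, 4-bit blocked-mask) table instead of A's rotating geometric scan loop, and resolves collisions with a tally dict over proposal pairs instead of A's Counter over a proposals dict.
import Mathlib
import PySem

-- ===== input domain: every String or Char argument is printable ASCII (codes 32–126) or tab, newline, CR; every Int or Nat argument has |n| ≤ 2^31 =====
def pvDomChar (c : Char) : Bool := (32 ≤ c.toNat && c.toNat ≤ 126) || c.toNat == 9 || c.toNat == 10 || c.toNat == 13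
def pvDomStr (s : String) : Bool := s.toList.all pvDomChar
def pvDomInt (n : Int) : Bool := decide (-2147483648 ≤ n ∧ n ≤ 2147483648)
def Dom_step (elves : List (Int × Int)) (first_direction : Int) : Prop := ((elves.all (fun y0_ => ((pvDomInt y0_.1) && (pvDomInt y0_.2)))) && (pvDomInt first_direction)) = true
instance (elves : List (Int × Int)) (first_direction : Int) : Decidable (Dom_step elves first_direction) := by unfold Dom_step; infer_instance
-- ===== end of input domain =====

-- B inverts A's per-elf neighbourhood scan: a scatter pass stamps, for every elf, the
-- cells whose moves it blocks into four per-direction sets; moves are then picked from a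
-- precomputed (first_direction, blocked-mask) table and conflicts resolved by a tally dict
-- over the proposal pairs ('alternative' objective: different algorithm, same return value).

def pvDirections : List (Int × Int) := [(0, -1), (0, 1), (-1, 0), (1, 0)]

-- ===== PORT A =====
-- A's inner 'for direction_shift in range(4)' loop: on a failing direction the Python
-- writes proposals[elf] = elf and continues; all writes hit the SAME key, so the loop's
-- net effect is the single value this helper returns (move on first clear direction,
-- elf itself on fall-through).
def stepProposeLoopA (elves : List (Int × Int)) (x y first_direction : Int) :
    List Int → Int × Int
  | [] => (x, y)
  | shift :: rest =>
    let d := (PySem.List.pyGet? pvDirections (PySem.Int.mod (first_direction + shift) 4)).getD (0, 0)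
    let checks : List (Int × Int) :=
      if d.1 = 0 then [-1, 0, 1].map (fun cx => (x + cx, y + d.2))  -- range(-1, 2)
      else [-1, 0, 1].map (fun cy => (x + d.1, y + cy))
    if checks.all (fun c => !elves.contains c) then (x + d.1, y + d.2)
    else stepProposeLoopA elves x y first_direction rest

def stepProposeA (elves : List (Int × Int)) (elf : Int × Int) (first_direction : Int) :
    Int × Int :=
  let neighbors : List (Int × Int) :=
    [-1, 0, 1].flatMap (fun dx => [-1, 0, 1].map (fun dy => (elf.1 + dx, elf.2 + dy)))
  if neighbors.all (fun nb => !elves.contains nb || nb == elf) then elf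
  else stepProposeLoopA elves elf.1 elf.2 first_direction [0, 1, 2, 3]  -- range(4)

def step (elves : List (Int × Int)) (first_direction : Int) : List (Int × Int) :=
  let proposals : PySem.Dict (Int × Int) (Int × Int) :=
    elves.foldl (fun d elf => d.insert elf (stepProposeA elves elf first_direction))
      PySem.Dict.empty
  let counter : PySem.Dict (Int × Int) Int := PySem.Dict.counter proposals.values
  elves.foldl (fun new_elves elf =>
    let p := proposals.getD elf elf
    if counter.getD p 0 = 1 then PySem.Set.add new_elves p
    else PySem.Set.add new_elves elf) (PySem.Set.empty : PySem.Set (Int × Int))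

-- ===== PORT B =====
-- the 'for s in range(4)' search inside _choice_table
def pvPickLoop (fd mask : Int) : List Int → Option Int
  | [] => none
  | s :: rest =>
    let d := PySem.Int.mod (fd + s) 4
    if PySem.Int.band (mask >>> d.toNat) 1 = 0 then some d
    else pvPickLoop fd mask rest

-- _CHOICE = _choice_table(): row fd starts [None] then masks 1..15
def pvChoiceTable : List (List (Option Int)) :=
  (PySem.List.pyRange 0 4 1).map (fun fd =>
    none :: (PySem.List.pyRange 1 16 1).map (fun mask => pvPickLoop fd mask [0, 1, 2, 3]))

-- blocked = [set(), set(), set(), set()] as a quadruple of sets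
def pvB4 : Type :=
  PySem.Set (Int × Int) × PySem.Set (Int × Int) × PySem.Set (Int × Int) × PySem.Set (Int × Int)

-- body of 'for x, y in set(elves): for c in (-1, 0, 1): …' (stamps all four sets)
def pvStamp (b : pvB4) (e : Int × Int) : pvB4 :=
  ([-1, 0, 1] : List Int).foldl (fun b c =>
    (PySem.Set.add b.1 (e.1 + c, e.2 + 1),
     PySem.Set.add b.2.1 (e.1 + c, e.2 - 1),
     PySem.Set.add b.2.2.1 (e.1 + 1, e.2 + c),
     PySem.Set.add b.2.2.2 (e.1 - 1, e.2 + c))) b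

-- blocked[d]
def pvBlockedGet (b : pvB4) (d : Int) : PySem.Set (Int × Int) :=
  (PySem.List.pyGet? [b.1, b.2.1, b.2.2.1, b.2.2.2] d).getD []

-- mask |= 1 << d loop
def pvMask (b : pvB4) (elf : Int × Int) : Int :=
  ([0, 1, 2, 3] : List Int).foldl (fun mask d =>
    if PySem.Set.contains (pvBlockedGet b d) elf then PySem.Int.bor mask (1 <<< d.toNat)
    else mask) 0

-- pick = row[mask]; target cell for one elf
def pvTarget (blocked : pvB4) (row : List (Option Int)) (elf : Int × Int) : Int × Int :=
  match (PySem.List.pyGet? row (pvMask blocked elf)).getD none with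
  | none => elf
  | some pick =>
    let d := (PySem.List.pyGet? pvDirections pick).getD (0, 0)
    (elf.1 + d.1, elf.2 + d.2)

def step_alt (elves : List (Int × Int)) (first_direction : Int) : List (Int × Int) :=
  let blocked : pvB4 := (PySem.Set.ofList elves).foldl pvStamp
    (PySem.Set.empty, PySem.Set.empty, PySem.Set.empty, PySem.Set.empty)
  let row : List (Option Int) :=
    (PySem.List.pyGet? pvChoiceTable (PySem.Int.mod first_direction 4)).getD []
  let proposals : List ((Int × Int) × (Int × Int)) :=
    (PySem.List.dedup elves).map (fun elf => (elf, pvTarget blocked row elf))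
  let tally : PySem.Dict (Int × Int) Int :=
    proposals.foldl (fun t p => t.insert p.2 (t.getD p.2 0 + 1)) PySem.Dict.empty
  proposals.foldl (fun out p =>
      PySem.Set.add out (if 1 < tally.getD p.2 0 then p.1 else p.2))
    (PySem.Set.empty : PySem.Set (Int × Int))

-- ===== PRECONDITION & SPEC =====
def Spec_step (elves : List (Int × Int)) (first_direction : Int) (out : List (Int × Int)) : Prop := out = step_alt elves first_direction
instance (elves : List (Int × Int)) (first_direction : Int) (out : List (Int × Int)) : Decidable (Spec_step elves first_direction out) := by unfold Spec_step; infer_instance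

-- ===== CLAIM (what is proved, stated in full; the proofs are below) =====
def Claim_equal_step : Prop := ∀ (elves : List (Int × Int)) (first_direction : Int), Dom_step elves first_direction → Spec_step elves first_direction (step elves first_direction)

-- ===== LEMMAS AND PROOFS =====

theorem pv_contains_eq_decide_mem (s : PySem.Set (Int × Int)) (u : Int × Int) :
    PySem.Set.contains s u = decide (u ∈ s) := by simp [pysem]

-- membership through a fold that adds three cells per element
theorem mem_foldl_add3 (g1 g2 g3 : (Int × Int) → (Int × Int)) (l : List (Int × Int))
    (s : PySem.Set (Int × Int)) (p : Int × Int) :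
    p ∈ l.foldl (fun s e =>
        PySem.Set.add (PySem.Set.add (PySem.Set.add s (g1 e)) (g2 e)) (g3 e)) s
      ↔ p ∈ s ∨ ∃ e ∈ l, p = g1 e ∨ p = g2 e ∨ p = g3 e := by
  induction l generalizing s with
  | nil => simp
  | cons a rest ih =>
    rw [List.foldl_cons, ih]
    simp [PySem.Set.mem_add]
    aesop

-- the stamping fold acts componentwise
theorem stamp_components (l : List (Int × Int)) (b : pvB4) :
    l.foldl pvStamp b =
    (l.foldl (fun s e => PySem.Set.add (PySem.Set.add (PySem.Set.add s
        (e.1 + -1, e.2 + 1)) (e.1 + 0, e.2 + 1)) (e.1 + 1, e.2 + 1)) b.1,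
     l.foldl (fun s e => PySem.Set.add (PySem.Set.add (PySem.Set.add s
        (e.1 + -1, e.2 - 1)) (e.1 + 0, e.2 - 1)) (e.1 + 1, e.2 - 1)) b.2.1,
     l.foldl (fun s e => PySem.Set.add (PySem.Set.add (PySem.Set.add s
        (e.1 + 1, e.2 + -1)) (e.1 + 1, e.2 + 0)) (e.1 + 1, e.2 + 1)) b.2.2.1,
     l.foldl (fun s e => PySem.Set.add (PySem.Set.add (PySem.Set.add s
        (e.1 - 1, e.2 + -1)) (e.1 - 1, e.2 + 0)) (e.1 - 1, e.2 + 1)) b.2.2.2) := by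
  induction l generalizing b with
  | nil => rfl
  | cons a rest ih =>
    simp only [List.foldl_cons, ih]
    rfl

-- the mask-accumulation loop as a plain sum of bit contributions
set_option maxHeartbeats 1000000 in
theorem pvMask_eq (b : pvB4) (elf : Int × Int) :
    pvMask b elf =
      (if PySem.Set.contains (pvBlockedGet b 0) elf then 1 else 0)
    + (if PySem.Set.contains (pvBlockedGet b 1) elf then 2 else 0)
    + (if PySem.Set.contains (pvBlockedGet b 2) elf then 4 else 0)
    + (if PySem.Set.contains (pvBlockedGet b 3) elf then 8 else 0) := by
  unfold pvMask
  simp only [List.foldl_cons, List.foldl_nil]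
  cases h0 : PySem.Set.contains (pvBlockedGet b 0) elf <;>
  cases h1 : PySem.Set.contains (pvBlockedGet b 1) elf <;>
  cases h2 : PySem.Set.contains (pvBlockedGet b 2) elf <;>
  cases h3 : PySem.Set.contains (pvBlockedGet b 3) elf <;>
    simp <;> decide

-- B's per-elf propose (stamp sets + table) equals A's per-elf propose (scan loops)
set_option maxHeartbeats 4000000 in
theorem propose_eq (elves : List (Int × Int)) (fd : Int) (elf : Int × Int) :
    pvTarget ((PySem.Set.ofList elves).foldl pvStamp
        (PySem.Set.empty, PySem.Set.empty, PySem.Set.empty, PySem.Set.empty))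
      ((PySem.List.pyGet? pvChoiceTable (PySem.Int.mod fd 4)).getD []) elf
    = stepProposeA elves elf fd := by
  obtain ⟨x, y⟩ := elf
  have hmod : ∀ s : Int, PySem.Int.mod (fd + s) 4 = (fd + s) % 4 :=
    fun s => PySem.Int.mod_eq_emod_of_pos (by norm_num)
  have hmod0 : PySem.Int.mod fd 4 = fd % 4 := PySem.Int.mod_eq_emod_of_pos (by norm_num)
  have hstamp := stamp_components (PySem.Set.ofList elves)
      (PySem.Set.empty, PySem.Set.empty, PySem.Set.empty, PySem.Set.empty)
  -- bit 0: someone occupies the row above (y - 1)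
  have hc0 : PySem.Set.contains ((PySem.Set.ofList elves).foldl pvStamp
      (PySem.Set.empty, PySem.Set.empty, PySem.Set.empty, PySem.Set.empty)).1 (x, y)
      = decide ((x + -1, y + -1) ∈ elves ∨ (x + 0, y + -1) ∈ elves ∨ (x + 1, y + -1) ∈ elves) := by
    rw [pv_contains_eq_decide_mem, hstamp, decide_eq_decide, mem_foldl_add3]
    simp only [PySem.Set.empty, List.not_mem_nil, false_or, PySem.Set.mem_ofList]
    constructor
    · rintro ⟨⟨p, q⟩, he, h | h | h⟩ <;> simp only [Prod.mk.injEq] at h <;> obtain ⟨h1, h2⟩ := h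
      · right; right
        have hpq : ((x : Int) + 1, y + -1) = (p, q) := by simp only [Prod.mk.injEq]; omega
        rwa [hpq]
      · right; left
        have hpq : ((x : Int) + 0, y + -1) = (p, q) := by simp only [Prod.mk.injEq]; omega
        rwa [hpq]
      · left
        have hpq : ((x : Int) + -1, y + -1) = (p, q) := by simp only [Prod.mk.injEq]; omega
        rwa [hpq]
    · rintro (h | h | h)
      · exact ⟨_, h, by right; right; simp only [Prod.mk.injEq]; omega⟩
      · exact ⟨_, h, by right; left; simp only [Prod.mk.injEq]; omega⟩
      · exact ⟨_, h, by left; simp only [Prod.mk.injEq]; omega⟩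
  -- bit 1: someone occupies the row below (y + 1)
  have hc1 : PySem.Set.contains ((PySem.Set.ofList elves).foldl pvStamp
      (PySem.Set.empty, PySem.Set.empty, PySem.Set.empty, PySem.Set.empty)).2.1 (x, y)
      = decide ((x + -1, y + 1) ∈ elves ∨ (x + 0, y + 1) ∈ elves ∨ (x + 1, y + 1) ∈ elves) := by
    rw [pv_contains_eq_decide_mem, hstamp, decide_eq_decide, mem_foldl_add3]
    simp only [PySem.Set.empty, List.not_mem_nil, false_or, PySem.Set.mem_ofList]
    constructor
    · rintro ⟨⟨p, q⟩, he, h | h | h⟩ <;> simp only [Prod.mk.injEq] at h <;> obtain ⟨h1, h2⟩ := h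
      · right; right
        have hpq : ((x : Int) + 1, y + 1) = (p, q) := by simp only [Prod.mk.injEq]; omega
        rwa [hpq]
      · right; left
        have hpq : ((x : Int) + 0, y + 1) = (p, q) := by simp only [Prod.mk.injEq]; omega
        rwa [hpq]
      · left
        have hpq : ((x : Int) + -1, y + 1) = (p, q) := by simp only [Prod.mk.injEq]; omega
        rwa [hpq]
    · rintro (h | h | h)
      · exact ⟨_, h, by right; right; simp only [Prod.mk.injEq]; omega⟩
      · exact ⟨_, h, by right; left; simp only [Prod.mk.injEq]; omega⟩
      · exact ⟨_, h, by left; simp only [Prod.mk.injEq]; omega⟩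
  -- bit 2: someone occupies the column to the left (x - 1)
  have hc2 : PySem.Set.contains ((PySem.Set.ofList elves).foldl pvStamp
      (PySem.Set.empty, PySem.Set.empty, PySem.Set.empty, PySem.Set.empty)).2.2.1 (x, y)
      = decide ((x + -1, y + -1) ∈ elves ∨ (x + -1, y + 0) ∈ elves ∨ (x + -1, y + 1) ∈ elves) := by
    rw [pv_contains_eq_decide_mem, hstamp, decide_eq_decide, mem_foldl_add3]
    simp only [PySem.Set.empty, List.not_mem_nil, false_or, PySem.Set.mem_ofList]
    constructor
    · rintro ⟨⟨p, q⟩, he, h | h | h⟩ <;> simp only [Prod.mk.injEq] at h <;> obtain ⟨h1, h2⟩ := h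
      · right; right
        have hpq : ((x : Int) + -1, y + 1) = (p, q) := by simp only [Prod.mk.injEq]; omega
        rwa [hpq]
      · right; left
        have hpq : ((x : Int) + -1, y + 0) = (p, q) := by simp only [Prod.mk.injEq]; omega
        rwa [hpq]
      · left
        have hpq : ((x : Int) + -1, y + -1) = (p, q) := by simp only [Prod.mk.injEq]; omega
        rwa [hpq]
    · rintro (h | h | h)
      · exact ⟨_, h, by right; right; simp only [Prod.mk.injEq]; omega⟩
      · exact ⟨_, h, by right; left; simp only [Prod.mk.injEq]; omega⟩
      · exact ⟨_, h, by left; simp only [Prod.mk.injEq]; omega⟩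
  -- bit 3: someone occupies the column to the right (x + 1)
  have hc3 : PySem.Set.contains ((PySem.Set.ofList elves).foldl pvStamp
      (PySem.Set.empty, PySem.Set.empty, PySem.Set.empty, PySem.Set.empty)).2.2.2 (x, y)
      = decide ((x + 1, y + -1) ∈ elves ∨ (x + 1, y + 0) ∈ elves ∨ (x + 1, y + 1) ∈ elves) := by
    rw [pv_contains_eq_decide_mem, hstamp, decide_eq_decide, mem_foldl_add3]
    simp only [PySem.Set.empty, List.not_mem_nil, false_or, PySem.Set.mem_ofList]
    constructor
    · rintro ⟨⟨p, q⟩, he, h | h | h⟩ <;> simp only [Prod.mk.injEq] at h <;> obtain ⟨h1, h2⟩ := h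
      · right; right
        have hpq : ((x : Int) + 1, y + 1) = (p, q) := by simp only [Prod.mk.injEq]; omega
        rwa [hpq]
      · right; left
        have hpq : ((x : Int) + 1, y + 0) = (p, q) := by simp only [Prod.mk.injEq]; omega
        rwa [hpq]
      · left
        have hpq : ((x : Int) + 1, y + -1) = (p, q) := by simp only [Prod.mk.injEq]; omega
        rwa [hpq]
    · rintro (h | h | h)
      · exact ⟨_, h, by right; right; simp only [Prod.mk.injEq]; omega⟩
      · exact ⟨_, h, by right; left; simp only [Prod.mk.injEq]; omega⟩
      · exact ⟨_, h, by left; simp only [Prod.mk.injEq]; omega⟩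
  -- A's three-cell scans, as the same decided disjunctions
  have hA0 : (([(x + -1, y + -1), (x + 0, y + -1), (x + 1, y + -1)] : List (Int × Int)).all
      (fun c => !elves.contains c)) = !decide ((x + -1, y + -1) ∈ elves ∨ (x + 0, y + -1) ∈ elves ∨ (x + 1, y + -1) ∈ elves) := by
    apply Bool.coe_iff_coe.mp
    simp [List.contains_eq_mem]
  have hA1 : (([(x + -1, y + 1), (x + 0, y + 1), (x + 1, y + 1)] : List (Int × Int)).all
      (fun c => !elves.contains c)) = !decide ((x + -1, y + 1) ∈ elves ∨ (x + 0, y + 1) ∈ elves ∨ (x + 1, y + 1) ∈ elves) := by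
    apply Bool.coe_iff_coe.mp
    simp [List.contains_eq_mem]
  have hA2 : (([(x + -1, y + -1), (x + -1, y + 0), (x + -1, y + 1)] : List (Int × Int)).all
      (fun c => !elves.contains c)) = !decide ((x + -1, y + -1) ∈ elves ∨ (x + -1, y + 0) ∈ elves ∨ (x + -1, y + 1) ∈ elves) := by
    apply Bool.coe_iff_coe.mp
    simp [List.contains_eq_mem]
  have hA3 : (([(x + 1, y + -1), (x + 1, y + 0), (x + 1, y + 1)] : List (Int × Int)).all
      (fun c => !elves.contains c)) = !decide ((x + 1, y + -1) ∈ elves ∨ (x + 1, y + 0) ∈ elves ∨ (x + 1, y + 1) ∈ elves) := by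
    apply Bool.coe_iff_coe.mp
    simp [List.contains_eq_mem]
  -- A's 9-cell crowdedness test is the union of the four bits
  have hn : ((([-1, 0, 1] : List Int).flatMap (fun dx => ([-1, 0, 1] : List Int).map
        (fun dy => ((x : Int) + dx, y + dy)))).all
      (fun nb => !elves.contains nb || nb == ((x, y) : Int × Int)))
      = !(decide ((x + -1, y + -1) ∈ elves ∨ (x + 0, y + -1) ∈ elves ∨ (x + 1, y + -1) ∈ elves) || decide ((x + -1, y + 1) ∈ elves ∨ (x + 0, y + 1) ∈ elves ∨ (x + 1, y + 1) ∈ elves) || decide ((x + -1, y + -1) ∈ elves ∨ (x + -1, y + 0) ∈ elves ∨ (x + -1, y + 1) ∈ elves) || decide ((x + 1, y + -1) ∈ elves ∨ (x + 1, y + 0) ∈ elves ∨ (x + 1, y + 1) ∈ elves)) := by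
    apply Bool.coe_iff_coe.mp
    have hx1 : ¬((x : Int) + -1 = x) := by omega
    have hx2 : ¬((x : Int) + 1 = x) := by omega
    have hy1 : ¬((y : Int) + -1 = y) := by omega
    have hy2 : ¬((y : Int) + 1 = y) := by omega
    simp [List.contains_eq_mem, Prod.mk.injEq, hx1, hx2, hy1, hy2]
    tauto
  have q0 : ∀ b : pvB4, pvBlockedGet b 0 = b.1 := fun b => rfl
  have q1 : ∀ b : pvB4, pvBlockedGet b 1 = b.2.1 := fun b => rfl
  have q2 : ∀ b : pvB4, pvBlockedGet b 2 = b.2.2.1 := fun b => rfl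
  have q3 : ∀ b : pvB4, pvBlockedGet b 3 = b.2.2.2 := fun b => rfl
  have hr : fd % 4 = 0 ∨ fd % 4 = 1 ∨ fd % 4 = 2 ∨ fd % 4 = 3 := by omega
  rcases hr with h | h | h | h
  · have h0 : (fd + 0) % 4 = 0 := by omega
    have h1 : (fd + 1) % 4 = 1 := by omega
    have h2 : (fd + 2) % 4 = 2 := by omega
    have h3 : (fd + 3) % 4 = 3 := by omega
    have hrow : (PySem.List.pyGet? pvChoiceTable (PySem.Int.mod fd 4)).getD [] =
        [none, some 1, some 0, some 2, some 0, some 1, some 0, some 3, some 0, some 1, some 0, some 2, some 0, some 1, some 0, none] := by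
      rw [hmod0, h]; decide
    have g0 : PySem.List.pyGet? pvDirections 0 = some (0, -1) := by decide
    have g1 : PySem.List.pyGet? pvDirections 1 = some (0, 1) := by decide
    have g2 : PySem.List.pyGet? pvDirections 2 = some (-1, 0) := by decide
    have g3 : PySem.List.pyGet? pvDirections 3 = some (1, 0) := by decide
    simp only [pvTarget, hrow, pvMask_eq, q0, q1, q2, q3, hc0, hc1, hc2, hc3,
      stepProposeA, stepProposeLoopA, hmod, h0, h1, h2, h3, g0, g1, g2, g3,
      Option.getD_some, reduceIte]
    simp only [hn]
    simp only [List.map_cons, List.map_nil, Int.reduceEq, reduceIte]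
    simp only [hA0, hA1, hA2, hA3]
    by_cases hP0 : ((x + -1, y + -1) ∈ elves ∨ (x + 0, y + -1) ∈ elves ∨ (x + 1, y + -1) ∈ elves) <;> by_cases hP1 : ((x + -1, y + 1) ∈ elves ∨ (x + 0, y + 1) ∈ elves ∨ (x + 1, y + 1) ∈ elves) <;>
    by_cases hP2 : ((x + -1, y + -1) ∈ elves ∨ (x + -1, y + 0) ∈ elves ∨ (x + -1, y + 1) ∈ elves) <;> by_cases hP3 : ((x + 1, y + -1) ∈ elves ∨ (x + 1, y + 0) ∈ elves ∨ (x + 1, y + 1) ∈ elves) <;>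
      (simp only [hP0, hP1, hP2, hP3]) <;> simp [PySem.List.pyGet?, PySem.List.pyIdx?, pvDirections]
  · have h0 : (fd + 0) % 4 = 1 := by omega
    have h1 : (fd + 1) % 4 = 2 := by omega
    have h2 : (fd + 2) % 4 = 3 := by omega
    have h3 : (fd + 3) % 4 = 0 := by omega
    have hrow : (PySem.List.pyGet? pvChoiceTable (PySem.Int.mod fd 4)).getD [] =
        [none, some 1, some 2, some 2, some 1, some 1, some 3, some 3, some 1, some 1, some 2, some 2, some 1, some 1, some 0, none] := by
      rw [hmod0, h]; decide
    have g0 : PySem.List.pyGet? pvDirections 0 = some (0, -1) := by decide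
    have g1 : PySem.List.pyGet? pvDirections 1 = some (0, 1) := by decide
    have g2 : PySem.List.pyGet? pvDirections 2 = some (-1, 0) := by decide
    have g3 : PySem.List.pyGet? pvDirections 3 = some (1, 0) := by decide
    simp only [pvTarget, hrow, pvMask_eq, q0, q1, q2, q3, hc0, hc1, hc2, hc3,
      stepProposeA, stepProposeLoopA, hmod, h0, h1, h2, h3, g0, g1, g2, g3,
      Option.getD_some, reduceIte]
    simp only [hn]
    simp only [List.map_cons, List.map_nil, Int.reduceEq, reduceIte]
    simp only [hA0, hA1, hA2, hA3]
    by_cases hP0 : ((x + -1, y + -1) ∈ elves ∨ (x + 0, y + -1) ∈ elves ∨ (x + 1, y + -1) ∈ elves) <;> by_cases hP1 : ((x + -1, y + 1) ∈ elves ∨ (x + 0, y + 1) ∈ elves ∨ (x + 1, y + 1) ∈ elves) <;>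
    by_cases hP2 : ((x + -1, y + -1) ∈ elves ∨ (x + -1, y + 0) ∈ elves ∨ (x + -1, y + 1) ∈ elves) <;> by_cases hP3 : ((x + 1, y + -1) ∈ elves ∨ (x + 1, y + 0) ∈ elves ∨ (x + 1, y + 1) ∈ elves) <;>
      (simp only [hP0, hP1, hP2, hP3]) <;> simp [PySem.List.pyGet?, PySem.List.pyIdx?, pvDirections]
  · have h0 : (fd + 0) % 4 = 2 := by omega
    have h1 : (fd + 1) % 4 = 3 := by omega
    have h2 : (fd + 2) % 4 = 0 := by omega
    have h3 : (fd + 3) % 4 = 1 := by omega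
    have hrow : (PySem.List.pyGet? pvChoiceTable (PySem.Int.mod fd 4)).getD [] =
        [none, some 2, some 2, some 2, some 3, some 3, some 3, some 3, some 2, some 2, some 2, some 2, some 0, some 1, some 0, none] := by
      rw [hmod0, h]; decide
    have g0 : PySem.List.pyGet? pvDirections 0 = some (0, -1) := by decide
    have g1 : PySem.List.pyGet? pvDirections 1 = some (0, 1) := by decide
    have g2 : PySem.List.pyGet? pvDirections 2 = some (-1, 0) := by decide
    have g3 : PySem.List.pyGet? pvDirections 3 = some (1, 0) := by decide
    simp only [pvTarget, hrow, pvMask_eq, q0, q1, q2, q3, hc0, hc1, hc2, hc3,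
      stepProposeA, stepProposeLoopA, hmod, h0, h1, h2, h3, g0, g1, g2, g3,
      Option.getD_some, reduceIte]
    simp only [hn]
    simp only [List.map_cons, List.map_nil, Int.reduceEq, reduceIte]
    simp only [hA0, hA1, hA2, hA3]
    by_cases hP0 : ((x + -1, y + -1) ∈ elves ∨ (x + 0, y + -1) ∈ elves ∨ (x + 1, y + -1) ∈ elves) <;> by_cases hP1 : ((x + -1, y + 1) ∈ elves ∨ (x + 0, y + 1) ∈ elves ∨ (x + 1, y + 1) ∈ elves) <;>
    by_cases hP2 : ((x + -1, y + -1) ∈ elves ∨ (x + -1, y + 0) ∈ elves ∨ (x + -1, y + 1) ∈ elves) <;> by_cases hP3 : ((x + 1, y + -1) ∈ elves ∨ (x + 1, y + 0) ∈ elves ∨ (x + 1, y + 1) ∈ elves) <;>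
      (simp only [hP0, hP1, hP2, hP3]) <;> simp [PySem.List.pyGet?, PySem.List.pyIdx?, pvDirections]
  · have h0 : (fd + 0) % 4 = 3 := by omega
    have h1 : (fd + 1) % 4 = 0 := by omega
    have h2 : (fd + 2) % 4 = 1 := by omega
    have h3 : (fd + 3) % 4 = 2 := by omega
    have hrow : (PySem.List.pyGet? pvChoiceTable (PySem.Int.mod fd 4)).getD [] =
        [none, some 3, some 3, some 3, some 3, some 3, some 3, some 3, some 0, some 1, some 0, some 2, some 0, some 1, some 0, none] := by
      rw [hmod0, h]; decide
    have g0 : PySem.List.pyGet? pvDirections 0 = some (0, -1) := by decide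
    have g1 : PySem.List.pyGet? pvDirections 1 = some (0, 1) := by decide
    have g2 : PySem.List.pyGet? pvDirections 2 = some (-1, 0) := by decide
    have g3 : PySem.List.pyGet? pvDirections 3 = some (1, 0) := by decide
    simp only [pvTarget, hrow, pvMask_eq, q0, q1, q2, q3, hc0, hc1, hc2, hc3,
      stepProposeA, stepProposeLoopA, hmod, h0, h1, h2, h3, g0, g1, g2, g3,
      Option.getD_some, reduceIte]
    simp only [hn]
    simp only [List.map_cons, List.map_nil, Int.reduceEq, reduceIte]
    simp only [hA0, hA1, hA2, hA3]
    by_cases hP0 : ((x + -1, y + -1) ∈ elves ∨ (x + 0, y + -1) ∈ elves ∨ (x + 1, y + -1) ∈ elves) <;> by_cases hP1 : ((x + -1, y + 1) ∈ elves ∨ (x + 0, y + 1) ∈ elves ∨ (x + 1, y + 1) ∈ elves) <;>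
    by_cases hP2 : ((x + -1, y + -1) ∈ elves ∨ (x + -1, y + 0) ∈ elves ∨ (x + -1, y + 1) ∈ elves) <;> by_cases hP3 : ((x + 1, y + -1) ∈ elves ∨ (x + 1, y + 0) ∈ elves ∨ (x + 1, y + 1) ∈ elves) <;>
      (simp only [hP0, hP1, hP2, hP3]) <;> simp [PySem.List.pyGet?, PySem.List.pyIdx?, pvDirections]


-- A's proposal dict, built by inserting a value that is a function of the key,
-- holds one entry per distinct elf (first-insertion order)
theorem pv_items_foldl_insert (l : List (Int × Int)) (f : (Int × Int) → (Int × Int)) :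
    (l.foldl (fun d e => d.insert e (f e)) PySem.Dict.empty).items
      = (PySem.Set.ofList l).map (fun e => (e, f e)) := by
  induction l using List.reverseRecOn with
  | nil => rfl
  | append_singleton l x ih =>
    rw [List.foldl_append, PySem.Set.ofList_append_singleton]
    by_cases hx : x ∈ l
    · have hc : (l.foldl (fun d e => d.insert e (f e)) PySem.Dict.empty).contains x = true := by
        rw [PySem.Dict.contains_eq_decide_mem_keys, PySem.Dict.keys_foldl_insert]
        simp [PySem.Set.mem_update, hx]
      rw [List.foldl_cons, List.foldl_nil, PySem.Dict.items_insert_of_contains (h := hc), ih,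
        PySem.Set.add_of_mem (by simp [PySem.Set.mem_ofList, hx]), List.map_map]
      apply List.map_congr_left
      intro e he
      by_cases hex : e = x <;> simp [hex]
    · have hc : (l.foldl (fun d e => d.insert e (f e)) PySem.Dict.empty).contains x = false := by
        rw [PySem.Dict.contains_eq_decide_mem_keys, PySem.Dict.keys_foldl_insert]
        simp [PySem.Set.mem_update, hx]
      rw [List.foldl_cons, List.foldl_nil, PySem.Dict.items_insert_of_not_contains (h := hc), ih,
        PySem.Set.add_of_not_mem (by simp [PySem.Set.mem_ofList, hx])]
      simp

-- dedup before or after mapping-and-dedup gives the same distinct list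
theorem pv_ofList_map_ofList (l : List (Int × Int)) (h : (Int × Int) → (Int × Int)) :
    PySem.Set.ofList (l.map h) = PySem.Set.ofList ((PySem.Set.ofList l).map h) := by
  induction l using List.reverseRecOn with
  | nil => rfl
  | append_singleton l x ih =>
    rw [List.map_append, List.map_singleton, PySem.Set.ofList_append_singleton,
      PySem.Set.ofList_append_singleton]
    by_cases hx : x ∈ l
    · rw [PySem.Set.add_of_mem (x := x) (by simp [PySem.Set.mem_ofList, hx]), ih,
        PySem.Set.add_of_mem]
      simp only [PySem.Set.mem_ofList, List.mem_map]
      exact ⟨x, by simp [hx]⟩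
    · rw [PySem.Set.add_of_not_mem (x := x) (by simp [PySem.Set.mem_ofList, hx]), ih,
        List.map_append, List.map_singleton, PySem.Set.ofList_append_singleton]

theorem step_eq (elves : List (Int × Int)) (fd : Int) :
    step elves fd = step_alt elves fd := by
  simp only [step, step_alt]
  set f : (Int × Int) → (Int × Int) := fun e => stepProposeA elves e fd with hf
  set T : List (Int × Int) := (PySem.Set.ofList elves).map f with hT
  set g : (Int × Int) → (Int × Int) :=
    fun e => if (T.count (f e) : Int) = 1 then f e else e with hg
  -- A side
  have hitems : (elves.foldl (fun d elf => d.insert elf (stepProposeA elves elf fd))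
      PySem.Dict.empty).items = (PySem.Set.ofList elves).map (fun e => (e, f e)) :=
    pv_items_foldl_insert elves f
  have hnodup : (elves.foldl (fun d elf => d.insert elf (stepProposeA elves elf fd))
      PySem.Dict.empty).keys.Nodup :=
    PySem.Dict.nodup_keys_foldl_insert _ _ _ PySem.Dict.nodup_keys_empty
  have hvalues : (elves.foldl (fun d elf => d.insert elf (stepProposeA elves elf fd))
      PySem.Dict.empty).values = T := by
    simp only [PySem.Dict.values, hitems, List.map_map, hT]
    rfl
  have hget : ∀ e ∈ elves, (elves.foldl (fun d elf =>
      d.insert elf (stepProposeA elves elf fd)) PySem.Dict.empty).getD e e = f e := by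
    intro e he
    have hme : (e, f e) ∈ (elves.foldl (fun d elf =>
        d.insert elf (stepProposeA elves elf fd)) PySem.Dict.empty).items := by
      rw [hitems]
      exact List.mem_map_of_mem (by simp [PySem.Set.mem_ofList, he])
    exact PySem.Dict.getD_of_mem_items _ hme hnodup e
  have hA : (elves.foldl (fun new_elves elf =>
      let p := (elves.foldl (fun d elf => d.insert elf (stepProposeA elves elf fd))
        PySem.Dict.empty).getD elf elf
      if (PySem.Dict.counter ((elves.foldl (fun d elf =>
            d.insert elf (stepProposeA elves elf fd)) PySem.Dict.empty).values)).getD p 0 = 1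
      then PySem.Set.add new_elves p else PySem.Set.add new_elves elf)
      (PySem.Set.empty : PySem.Set (Int × Int)))
      = elves.foldl (fun s e => PySem.Set.add s (g e))
        (PySem.Set.empty : PySem.Set (Int × Int)) := by
    apply PySem.List.foldl_congr_mem
    intro acc e he
    simp only []
    simp only [hget e he, hvalues, PySem.Dict.getD_counter, hg]
    split_ifs <;> rfl
  rw [hA, ← PySem.Set.update_map_eq_foldl_add, PySem.Set.update_empty]
  -- B side
  have hprop : (PySem.List.dedup elves).map (fun elf =>
      (elf, pvTarget ((PySem.Set.ofList elves).foldl pvStamp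
          (PySem.Set.empty, PySem.Set.empty, PySem.Set.empty, PySem.Set.empty))
        ((PySem.List.pyGet? pvChoiceTable (PySem.Int.mod fd 4)).getD []) elf))
      = (PySem.Set.ofList elves).map (fun e => (e, f e)) := by
    refine List.map_congr_left (fun e _ => ?_)
    rw [propose_eq elves fd e]
  rw [hprop]
  -- the tally dict holds exact multiplicities of T
  have htally : ∀ v, ((List.map (fun e => (e, f e)) (PySem.Set.ofList elves)).foldl
      (fun t p => t.insert p.2 (t.getD p.2 0 + 1))
      (PySem.Dict.empty : PySem.Dict (Int × Int) Int)).getD v 0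
      = (T.count v : Int) := by
    intro v
    have h2 := PySem.Dict.getD_foldl_insert_add_one (l := T) (d := PySem.Dict.empty) (v := v)
    rw [hT, List.foldl_map] at h2
    rw [List.foldl_map]
    simpa using h2
  have hres : ∀ (acc : PySem.Set (Int × Int)),
      ∀ p ∈ (PySem.Set.ofList elves).map (fun e => (e, f e)),
      PySem.Set.add acc (if 1 < (((PySem.Set.ofList elves).map (fun e => (e, f e))).foldl
          (fun t p => t.insert p.2 (t.getD p.2 0 + 1))
          (PySem.Dict.empty : PySem.Dict (Int × Int) Int)).getD p.2 0
        then p.1 else p.2)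
      = PySem.Set.add acc (g p.1) := by
    intro acc p hp
    obtain ⟨e, he, rfl⟩ := List.mem_map.mp hp
    simp only [htally, hg]
    have hmem : f e ∈ T := by rw [hT]; exact List.mem_map_of_mem he
    have h1 : 1 ≤ T.count (f e) := List.one_le_count_iff.mpr hmem
    rcases eq_or_ne (T.count (f e)) 1 with hone | hone
    · rw [if_neg (by simp [hone]), if_pos (by exact_mod_cast hone)]
    · rw [if_pos (by omega), if_neg (by exact_mod_cast hone)]
  rw [PySem.List.foldl_congr_mem _ _ _ _ hres]
  have hB : ((PySem.Set.ofList elves).map (fun e => (e, f e))).foldl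
      (fun acc p => PySem.Set.add acc (g p.1)) (PySem.Set.empty : PySem.Set (Int × Int))
      = (PySem.Set.ofList elves).foldl (fun acc e => PySem.Set.add acc (g e))
        (PySem.Set.empty : PySem.Set (Int × Int)) := List.foldl_map
  rw [hB, ← PySem.Set.update_map_eq_foldl_add, PySem.Set.update_empty, ← pv_ofList_map_ofList]

-- ===== VERDICT (by name: the statement is the Claim_ definition above) =====
theorem step_spec : Claim_equal_step := by
  intro elves fd _
  unfold Spec_step
  exact step_eq elves fd
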